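-- pv_equiv track=rewrite | github.com/Hangyeol82/RL-based-Coverage-Path-Planning | map_generators/indoor.py | _merge_cluster_sizes
-- ===== SOURCE A (Python) =====
-- from typing import List, Tuple
--
-- GridPos = Tuple[int, int]
--
-- Edge = Tuple[GridPos, GridPos]
--
-- def _merge_cluster_sizes(rows: int, cols: int, merge_edges: List[Edge]) -> List[int]:
--     if not merge_edges:
--         return []
--
--     parent = {}
--
--     def find(x: GridPos) -> GridPos:
--         parent.setdefault(x, x)
--         if parent[x] != x:
--             parent[x] = find(parent[x])
--         return parent[x]
--
--     def union(a: GridPos, b: GridPos) -> None: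
--         ra = find(a)
--         rb = find(b)
--         if ra != rb:
--             parent[rb] = ra
--
--     for rr in range(rows):
--         for cc in range(cols):
--             parent[(rr, cc)] = (rr, cc)
--     for a, b in merge_edges:
--         union(a, b)
--
--     sizes = {}
--     for node in parent:
--         root = find(node)
--         sizes[root] = sizes.get(root, 0) + 1
--     return sorted((size for size in sizes.values() if size > 1), reverse=True)
-- ===== SOURCE B (Python) =====
-- def _merge_cluster_sizes(rows, cols, merge_edges):
--     # Merge explicit component blocks per edge; grid singletons never survive the
--     # size>1 filter, so the rows x cols initialisation is not needed at all.
--     comps = []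
--     for a, b in merge_edges:
--         merged = []
--         rest = []
--         for c in comps:
--             if a in c or b in c:
--                 merged = merged + c
--             else:
--                 rest.append(c)
--         if a not in merged:
--             merged.append(a)
--         if b not in merged:
--             merged.append(b)
--         comps = rest + [merged]
--     return sorted((len(c) for c in comps if len(c) > 1), reverse=True)
-- ===== Notes on version B (the rewrite author's own statement) =====
-- stated objective: faster
-- what changed: Replaces the union-find-with-path-compression over a parent dict seeded with all rows*cols grid cells by a flat per-edge merge of explicit component blocks (scan blocks, coalesce those touching either endpoint, append missing endpoints); grid cells are never touched since their singleton components are filtered out by the size>1 condition, so all rows*cols initialisation and per-cell counting work disappears.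
import Mathlib
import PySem

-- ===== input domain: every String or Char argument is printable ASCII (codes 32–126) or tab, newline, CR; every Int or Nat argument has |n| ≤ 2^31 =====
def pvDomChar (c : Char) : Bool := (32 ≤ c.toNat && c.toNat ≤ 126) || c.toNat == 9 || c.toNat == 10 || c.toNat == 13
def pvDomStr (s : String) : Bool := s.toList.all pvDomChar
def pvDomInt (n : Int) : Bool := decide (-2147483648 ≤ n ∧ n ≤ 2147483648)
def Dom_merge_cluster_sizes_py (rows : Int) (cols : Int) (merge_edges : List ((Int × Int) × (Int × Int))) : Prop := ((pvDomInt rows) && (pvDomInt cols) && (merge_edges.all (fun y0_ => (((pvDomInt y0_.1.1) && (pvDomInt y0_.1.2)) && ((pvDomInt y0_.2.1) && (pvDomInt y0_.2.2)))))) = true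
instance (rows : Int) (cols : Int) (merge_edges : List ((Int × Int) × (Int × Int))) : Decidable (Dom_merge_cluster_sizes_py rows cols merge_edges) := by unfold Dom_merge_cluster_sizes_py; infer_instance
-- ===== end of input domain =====

-- B replaces A's union-find over a parent dict seeded with every grid cell by a flat
-- per-edge merge of explicit component blocks (simpler: shorter, no recursion, no dict).
-- A's Python dicts are ported with Std.HashMap (an association-list dict is infeasible to
-- evaluate at rows*cols keys); its iteration order may differ from Python's insertion order,
-- but the returned sorted list is proven independent of that enumeration order.

-- ===== PORT A =====
-- 'find' with path compression; the fuel argument only makes the Python recursion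
-- structural (fuel = dict size + 1 always suffices: parent chains are acyclic).
def pfind : Nat → Std.HashMap (Int × Int) (Int × Int) → (Int × Int) →
    ((Int × Int) × Std.HashMap (Int × Int) (Int × Int))
  | 0, d, x => (x, d)   -- unreachable with fuel = size + 1
  | (fuel+1), d, x =>
    let d1 := if d.contains x then d else d.insert x x   -- parent.setdefault(x, x)
    let px := d1.getD x x                                 -- parent[x]
    if px ≠ x then
      let r := pfind fuel d1 px         -- parent[x] = find(parent[x])
      (r.1, r.2.insert x r.1)           -- return parent[x]
    else (px, d1)

def punion (d : Std.HashMap (Int × Int) (Int × Int)) (a b : Int × Int) :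
    Std.HashMap (Int × Int) (Int × Int) :=
  let fa := pfind (d.size + 1) d a
  let fb := pfind (fa.2.size + 1) fa.2 b
  if fa.1 ≠ fb.1 then fb.2.insert fb.1 fa.1 else fb.2

def merge_cluster_sizes_py (rows : Int) (cols : Int) (merge_edges : List ((Int × Int) × (Int × Int))) : List Int :=
  if merge_edges = [] then []
  else
    let d0 := (PySem.List.pyRange 0 rows 1).foldl (fun d rr =>
        (PySem.List.pyRange 0 cols 1).foldl (fun d cc => d.insert (rr, cc) (rr, cc)) d)
        (∅ : Std.HashMap (Int × Int) (Int × Int))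
    let d1 := merge_edges.foldl (fun d e => punion d e.1 e.2) d0
    let p := d1.keys.foldl (fun (sd : Std.HashMap (Int × Int) Int × Std.HashMap (Int × Int) (Int × Int)) node =>
        let f := pfind (sd.2.size + 1) sd.2 node
        (sd.1.insert f.1 (sd.1.getD f.1 0 + 1), f.2)) ((∅ : Std.HashMap (Int × Int) Int), d1)
    -- sizes.values(): the dict's value list (toList.map Prod.snd enumerates exactly the values)
    PySem.List.sorted ((p.1.toList.map Prod.snd).filter (fun s => decide (1 < s))) (fun x => x) true

-- ===== PORT B =====
def bStep (comps : List (List (Int × Int))) (a b : Int × Int) : List (List (Int × Int)) :=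
  let p := comps.foldl (fun (mr : List (Int × Int) × List (List (Int × Int))) c =>
      if a ∈ c ∨ b ∈ c then (mr.1 ++ c, mr.2) else (mr.1, mr.2 ++ [c])) ([], [])
  let m1 := if a ∈ p.1 then p.1 else p.1 ++ [a]
  let m2 := if b ∈ m1 then m1 else m1 ++ [b]
  p.2 ++ [m2]

def merge_cluster_sizes_py_alt (rows : Int) (cols : Int) (merge_edges : List ((Int × Int) × (Int × Int))) : List Int :=
  let comps := merge_edges.foldl (fun comps e => bStep comps e.1 e.2)
      ([] : List (List (Int × Int)))
  PySem.List.sorted ((comps.filter (fun c => decide (1 < c.length))).map (fun c => (c.length : Int)))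
    (fun x => x) true

-- ===== PRECONDITION & SPEC =====
def Spec_merge_cluster_sizes_py (rows : Int) (cols : Int) (merge_edges : List ((Int × Int) × (Int × Int))) (out : List Int) : Prop := out = merge_cluster_sizes_py_alt rows cols merge_edges
instance (rows : Int) (cols : Int) (merge_edges : List ((Int × Int) × (Int × Int))) (out : List Int) : Decidable (Spec_merge_cluster_sizes_py rows cols merge_edges out) := by unfold Spec_merge_cluster_sizes_py; infer_instance

-- ===== CLAIM (what is proved, stated in full; the proofs are below) =====
def Claim_equal_merge_cluster_sizes_py : Prop := ∀ (rows : Int) (cols : Int) (merge_edges : List ((Int × Int) × (Int × Int))), Dom_merge_cluster_sizes_py rows cols merge_edges → Spec_merge_cluster_sizes_py rows cols merge_edges (merge_cluster_sizes_py rows cols merge_edges)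

-- ===== LEMMAS AND PROOFS =====


-- ---- parent-chain semantics of A's dict ----
def stepP (d : Std.HashMap (Int × Int) (Int × Int)) (x : Int × Int) : Int × Int :=
  (d[x]?).getD x

def iterP (d : Std.HashMap (Int × Int) (Int × Int)) (n : Nat) (x : Int × Int) : Int × Int :=
  (stepP d)^[n] x

def FixP (d : Std.HashMap (Int × Int) (Int × Int)) (x : Int × Int) : Prop := stepP d x = x

def IsFix (d : Std.HashMap (Int × Int) (Int × Int)) (n : Nat) (x : Int × Int) : Prop :=
  FixP d (iterP d n x)

-- Invariant of A's parent dict, with semantic root map ρ.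
structure InvS (d : Std.HashMap (Int × Int) (Int × Int)) (ρ : (Int × Int) → (Int × Int)) : Prop where
  closed : ∀ (x p : Int × Int), d[x]? = some p → p ∈ d
  offkey : ∀ (x : Int × Int), d[x]? = none → ρ x = x
  selfroot : ∀ (x : Int × Int), d[x]? = some x → ρ x = x
  edge : ∀ (x p : Int × Int), d[x]? = some p → ρ p = ρ x
  rootfix : ∀ (x p : Int × Int), d[x]? = some p → d[ρ x]? = some (ρ x)
  term : ∀ (x : Int × Int), ∃ n, IsFix d n x

-- Relation between a root map (on key list ks) and B's component blocks.
structure RelS (ρ : (Int × Int) → (Int × Int)) (ks : List (Int × Int)) (comps : List (List (Int × Int))) : Prop where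
  offks : ∀ y, y ∉ ks → ρ y = y
  memks : ∀ x, x ∈ ks → ρ x ∈ ks
  bnodup : ∀ c ∈ comps, c.Nodup
  bsub : ∀ c ∈ comps, ∀ x ∈ c, x ∈ ks
  bsame : ∀ c ∈ comps, ∀ x ∈ c, ∀ y ∈ c, ρ x = ρ y
  bclosed : ∀ c ∈ comps, ∀ x ∈ c, ∀ y, y ∈ ks → ρ y = ρ x → y ∈ c
  bcover : ∀ x y, x ∈ ks → y ∈ ks → ρ x = ρ y → x ≠ y → ∃ c ∈ comps, x ∈ c
  bdisj : comps.Pairwise (fun c c' => ∀ x, x ∈ c → x ∉ c')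

-- ---- HashMap convenience lemmas ----
lemma hmget_insert (d : Std.HashMap (Int × Int) (Int × Int)) (k a v : Int × Int) :
    (d.insert k v)[a]? = if a = k then some v else d[a]? := by
  rw [Std.HashMap.getElem?_insert]
  by_cases h : a = k
  · rw [if_pos h, if_pos (show (k == a) = true from beq_iff_eq.mpr h.symm)]
  · rw [if_neg h, if_neg (show ¬((k == a) = true) from fun hb => h (beq_iff_eq.mp hb).symm)]

lemma hmmem_insert (d : Std.HashMap (Int × Int) (Int × Int)) (k a v : Int × Int) :
    a ∈ d.insert k v ↔ a = k ∨ a ∈ d := by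
  rw [Std.HashMap.mem_insert]
  constructor
  · rintro (hb | hm)
    · exact Or.inl (beq_iff_eq.mp hb).symm
    · exact Or.inr hm
  · rintro (he | hm)
    · exact Or.inl (beq_iff_eq.mpr he.symm)
    · exact Or.inr hm

lemma mem_of_getElem? (d : Std.HashMap (Int × Int) (Int × Int)) {x p : Int × Int}
    (h : d[x]? = some p) : x ∈ d := by
  rw [Std.HashMap.mem_iff_contains, Std.HashMap.contains_eq_isSome_getElem?, h]
  rfl

lemma getElem?_some_of_mem (d : Std.HashMap (Int × Int) (Int × Int)) {x : Int × Int}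
    (h : x ∈ d) : ∃ p, d[x]? = some p := by
  have hc : d.contains x = true := Std.HashMap.mem_iff_contains.1 h
  rw [Std.HashMap.contains_eq_isSome_getElem?] at hc
  cases hg : d[x]? with
  | none => rw [hg] at hc; simp at hc
  | some p => exact ⟨p, rfl⟩

lemma hmgetD_of_some (d : Std.HashMap (Int × Int) (Int × Int)) {x p : Int × Int}
    (h : d[x]? = some p) (d0 : Int × Int) : d.getD x d0 = p := by
  rw [Std.HashMap.getD_eq_getD_getElem?, h]
  rfl

-- ---- basic chain lemmas ----
lemma iterP_succ' (d : Std.HashMap (Int × Int) (Int × Int)) (n : Nat) (y : Int × Int) :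
    iterP d (n+1) y = stepP d (iterP d n y) := by
  simp [iterP, Function.iterate_succ_apply']

lemma iterP_fix (d : Std.HashMap (Int × Int) (Int × Int)) (y : Int × Int) (h : FixP d y) :
    ∀ n, iterP d n y = y := by
  intro n
  induction n with
  | zero => rfl
  | succ n ih => rw [iterP_succ', ih]; exact h

lemma isFix_succ (d : Std.HashMap (Int × Int) (Int × Int)) (n : Nat) (y : Int × Int) :
    IsFix d (n+1) y ↔ IsFix d n (stepP d y) := by
  simp [IsFix, iterP, Function.iterate_succ_apply]

lemma isFix_le (d : Std.HashMap (Int × Int) (Int × Int)) {m n : Nat} {y : Int × Int}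
    (h : IsFix d m y) (hmn : m ≤ n) : IsFix d n y := by
  induction n, hmn using Nat.le_induction with
  | base => exact h
  | succ n _ ih =>
    have e : iterP d (n+1) y = iterP d n y := by rw [iterP_succ']; exact ih
    unfold IsFix
    rw [e]
    exact ih

lemma isFix_of_agree (d d1 : Std.HashMap (Int × Int) (Int × Int))
    (hne : ∀ z, ¬ FixP d z → d1[z]? = d[z]?)
    (hfx : ∀ z, FixP d z → FixP d1 z) :
    ∀ n y, IsFix d n y → IsFix d1 n y := by
  intro n
  induction n with
  | zero => exact fun y h => hfx _ h
  | succ n ih =>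
    intro y h
    by_cases hf : FixP d y
    · have h1 : FixP d1 y := hfx y hf
      unfold IsFix
      rw [iterP_fix d1 y h1]
      exact h1
    · have hstep : stepP d1 y = stepP d y := by unfold stepP; rw [hne y hf]
      have h' : IsFix d n (stepP d y) := (isFix_succ d n y).1 h
      exact (isFix_succ d1 n y).2 (by rw [hstep]; exact ih _ h')

lemma term_insert (d : Std.HashMap (Int × Int) (Int × Int)) (u v : Int × Int)
    (hvu : v ≠ u) (hv : FixP d v) :
    ∀ n y, IsFix d n y → IsFix (d.insert u v) (n+1) y := by
  have hv1 : FixP (d.insert u v) v := by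
    unfold FixP stepP
    rw [hmget_insert, if_neg hvu]
    exact hv
  have hstepu : stepP (d.insert u v) u = v := by
    unfold stepP
    rw [hmget_insert, if_pos rfl]
    rfl
  have fix1 : ∀ y, y = u ∨ FixP d y → IsFix (d.insert u v) 1 y := by
    intro y hy
    by_cases hyu : y = u
    · have hsy : stepP (d.insert u v) y = v := by rw [hyu]; exact hstepu
      unfold IsFix
      rw [iterP_succ', show iterP (d.insert u v) 0 y = y from rfl, hsy]
      exact hv1
    · have hfy : FixP d y := hy.resolve_left hyu
      have h1 : FixP (d.insert u v) y := by
        unfold FixP stepP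
        rw [hmget_insert, if_neg hyu]
        exact hfy
      unfold IsFix
      rw [iterP_fix _ _ h1]
      exact h1
  intro n
  induction n with
  | zero => exact fun y h => fix1 y (Or.inr h)
  | succ n ih =>
    intro y h
    by_cases hyu : y = u
    · exact isFix_le _ (fix1 y (Or.inl hyu)) (by omega)
    · by_cases hf : FixP d y
      · exact isFix_le _ (fix1 y (Or.inr hf)) (by omega)
      · have hstep : stepP (d.insert u v) y = stepP d y := by
          unfold stepP
          rw [hmget_insert, if_neg hyu]
        have h' : IsFix d n (stepP d y) := (isFix_succ d n y).1 h
        exact (isFix_succ (d.insert u v) (n+1) y).2 (by rw [hstep]; exact ih _ h')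

lemma exists_isFix_le (d : Std.HashMap (Int × Int) (Int × Int)) (ρ : (Int × Int) → (Int × Int))
    (hInv : InvS d ρ) (x : Int × Int) : ∃ n ≤ d.size, IsFix d n x := by
  haveI : DecidablePred (fun n => IsFix d n x) := fun n => by
    unfold IsFix FixP
    infer_instance
  obtain ⟨m, hm⟩ := hInv.term x
  have hex : ∃ n, IsFix d n x := ⟨m, hm⟩
  by_cases hn : Nat.find hex ≤ d.size
  · exact ⟨Nat.find hex, hn, Nat.find_spec hex⟩
  exfalso
  rw [not_le] at hn
  set n := Nat.find hex with hndef
  have hnonfix : ∀ i, i < n → ¬ FixP d (iterP d i x) := by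
    intro i hi hfix
    exact Nat.find_min hex hi hfix
  have hmem : ∀ i, i < n → iterP d i x ∈ d.keys := by
    intro i hi
    have hnf := hnonfix i hi
    unfold FixP stepP at hnf
    cases hget : d[iterP d i x]? with
    | none => exact absurd (by rw [hget]; rfl) hnf
    | some p =>
      exact Std.HashMap.mem_keys.2 (mem_of_getElem? d hget)
  have hfixn : IsFix d n x := Nat.find_spec hex
  have hinj : ∀ i j, i < j → j < n → iterP d i x ≠ iterP d j x := by
    intro i j hij hj heq
    have h1 : iterP d n x = iterP d (n - j) (iterP d j x) := by
      unfold iterP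
      rw [← Function.iterate_add_apply]
      congr 1
      omega
    have h2 : iterP d (n - j + i) x = iterP d (n - j) (iterP d i x) := by
      unfold iterP
      rw [← Function.iterate_add_apply]
    have hiter : iterP d n x = iterP d (n - j + i) x := by rw [h1, ← heq, ← h2]
    have : IsFix d (n - j + i) x := by unfold IsFix; rw [← hiter]; exact hfixn
    exact Nat.find_min hex (by omega) this
  have hpw : (List.range n).Pairwise (fun i j => iterP d i x ≠ iterP d j x) := by
    refine (List.pairwise_lt_range (n := n)).imp_of_mem ?_
    intro i j hi hj hlt
    exact hinj i j hlt (List.mem_range.1 hj)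
  have hnd : ((List.range n).map (fun i => iterP d i x)).Nodup := by
    rw [List.Nodup, List.pairwise_map]
    exact hpw
  have hsub : ((List.range n).map (fun i => iterP d i x)).toFinset ⊆ d.keys.toFinset := by
    intro z hz
    rw [List.mem_toFinset, List.mem_map] at hz
    obtain ⟨i, hi, rfl⟩ := hz
    rw [List.mem_toFinset]
    exact hmem i (List.mem_range.1 hi)
  have h1 : ((List.range n).map (fun i => iterP d i x)).toFinset.card = n := by
    rw [List.toFinset_card_of_nodup hnd, List.length_map, List.length_range]
  have h2 := Finset.card_le_card hsub
  have h3 := List.toFinset_card_le d.keys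
  have h4 : d.keys.length = d.size := Std.HashMap.length_keys
  omega

-- ---- find ----
lemma pfind_go (ρ : (Int × Int) → (Int × Int)) :
    ∀ fuel n (d : Std.HashMap (Int × Int) (Int × Int)) (x : Int × Int),
    InvS d ρ → x ∈ d → IsFix d n x → n < fuel →
    (pfind fuel d x).1 = ρ x ∧ (∀ y, y ∈ (pfind fuel d x).2 ↔ y ∈ d) ∧
    InvS (pfind fuel d x).2 ρ := by
  intro fuel
  induction fuel with
  | zero => intro n d x _ _ _ hlt; omega
  | succ fuel ih =>
    intro n d x hInv hx hfix hlt
    have hcont : d.contains x = true := Std.HashMap.mem_iff_contains.1 hx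
    have hsd : (if d.contains x then d else d.insert x x) = d := if_pos hcont
    obtain ⟨p, hp⟩ : ∃ p, d[x]? = some p := getElem?_some_of_mem d hx
    have hgetD : d.getD x x = p := hmgetD_of_some d hp x
    have hbody : pfind (fuel+1) d x =
        if p ≠ x then
          ((pfind fuel d p).1, (pfind fuel d p).2.insert x (pfind fuel d p).1)
        else (p, d) := by
      show (let d1 := if d.contains x then d else d.insert x x
            let px := d1.getD x x
            if px ≠ x then
              let r := pfind fuel d1 px
              (r.1, r.2.insert x r.1)
            else (px, d1)) = _
      rw [hsd]
      simp only [hgetD]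
    by_cases hpx : p = x
    · rw [hbody, if_neg (by simp [hpx])]
      rw [hpx] at hp
      exact ⟨by rw [hpx]; exact (hInv.selfroot x hp).symm, fun y => Iff.rfl, hInv⟩
    · rw [hbody, if_pos hpx]
      have hpmem : p ∈ d := hInv.closed x p hp
      have hstep : stepP d x = p := by unfold stepP; rw [hp]; rfl
      have hn0 : n ≠ 0 := by
        intro h0
        subst h0
        have : stepP d x = x := hfix
        rw [hstep] at this
        exact hpx this
      have hfix' : IsFix d (n-1) p := by
        have := (isFix_succ d (n-1) x).1 (by rw [show n-1+1 = n by omega]; exact hfix)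
        rwa [hstep] at this
      obtain ⟨h1, h2, h3⟩ := ih (n-1) d p hInv hpmem hfix' (by omega)
      set E := (pfind fuel d p).2 with hE
      have hrx : ρ p = ρ x := hInv.edge x p hp
      have hxE : x ∈ E := (h2 x).2 hx
      obtain ⟨q, hq⟩ : ∃ q, E[x]? = some q := getElem?_some_of_mem E hxE
      have hrootE : E[ρ x]? = some (ρ x) := h3.rootfix x q hq
      have hrhorho : ρ (ρ x) = ρ x := h3.selfroot (ρ x) hrootE
      have hrHne : ρ x ≠ x := by
        intro he
        have h' := hInv.rootfix x p hp
        rw [he, hp] at h'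
        exact hpx (Option.some.inj h')
      have hfixE : FixP E (ρ x) := by
        unfold FixP stepP
        rw [hrootE]
        rfl
      have hget' : ∀ z, (E.insert x (ρ x))[z]? = if z = x then some (ρ x) else E[z]? :=
        fun z => hmget_insert E x z (ρ x)
      have hmemE' : ∀ y, y ∈ E.insert x (ρ x) ↔ y ∈ d := by
        intro y
        rw [hmmem_insert, h2 y]
        constructor
        · rintro (he | hm)
          · rw [he]; exact hx
          · exact hm
        · exact Or.inr
      have hInv' : InvS (E.insert x (ρ x)) ρ := by
        constructor
        · intro z w hz
          rw [hget'] at hz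
          rw [hmemE']
          by_cases hzx : z = x
          · rw [if_pos hzx] at hz
            rw [← Option.some.inj hz]
            exact (h2 _).1 (mem_of_getElem? E hrootE)
          · rw [if_neg hzx] at hz
            exact (h2 _).1 (h3.closed z w hz)
        · intro z hz
          rw [hget'] at hz
          by_cases hzx : z = x
          · rw [if_pos hzx] at hz; simp at hz
          · rw [if_neg hzx] at hz
            exact h3.offkey z hz
        · intro z hz
          rw [hget'] at hz
          by_cases hzx : z = x
          · rw [if_pos hzx] at hz
            have h' : ρ x = z := Option.some.inj hz
            rw [hzx] at h'
            exact absurd h' hrHne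
          · rw [if_neg hzx] at hz
            exact h3.selfroot z hz
        · intro z w hz
          rw [hget'] at hz
          by_cases hzx : z = x
          · rw [if_pos hzx] at hz
            rw [← Option.some.inj hz, hrhorho, hzx]
          · rw [if_neg hzx] at hz
            exact h3.edge z w hz
        · intro z w hz
          rw [hget'] at hz
          rw [hget']
          by_cases hzx : z = x
          · rw [hzx, if_neg hrHne]
            exact hrootE
          · rw [if_neg hzx] at hz
            have hr := h3.rootfix z w hz
            by_cases hrzx : ρ z = x
            · rw [hrzx] at hr
              exact absurd (h3.selfroot x hr) hrHne
            · rw [if_neg hrzx]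
              exact hr
        · intro y
          obtain ⟨m, hm⟩ := h3.term y
          exact ⟨m+1, term_insert E x (ρ x) hrHne hfixE m y hm⟩
      refine ⟨by rw [h1, hrx], ?_, ?_⟩
      · intro y
        show y ∈ E.insert x (pfind fuel d p).1 ↔ y ∈ d
        rw [h1, hrx]
        exact hmemE' y
      · show InvS (E.insert x (pfind fuel d p).1) ρ
        rw [h1, hrx]
        exact hInv'

lemma pfind_spec (ρ : (Int × Int) → (Int × Int)) (fuel : Nat)
    (d : Std.HashMap (Int × Int) (Int × Int)) (x : Int × Int)
    (hInv : InvS d ρ) (hfuel : d.size < fuel) :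
    (pfind fuel d x).1 = ρ x ∧ (∀ y, y ∈ (pfind fuel d x).2 ↔ y ∈ d ∨ y = x) ∧
    InvS (pfind fuel d x).2 ρ := by
  by_cases hx : x ∈ d
  · obtain ⟨n, hn, hfix⟩ := exists_isFix_le d ρ hInv x
    obtain ⟨h1, h2, h3⟩ := pfind_go ρ fuel n d x hInv hx hfix (by omega)
    refine ⟨h1, ?_, h3⟩
    intro y
    rw [h2 y]
    constructor
    · exact Or.inl
    · rintro (hm | he)
      · exact hm
      · rw [he]; exact hx
  · have hcont : d.contains x = false := by
      rw [← Bool.not_eq_true, ← Std.HashMap.mem_iff_contains]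
      exact hx
    have hnone : d[x]? = none := Std.HashMap.getElem?_eq_none hx
    have hrxx : ρ x = x := hInv.offkey x hnone
    cases fuel with
    | zero => omega
    | succ f =>
      have hget1 : ∀ z, (d.insert x x)[z]? = if z = x then some x else d[z]? :=
        fun z => hmget_insert d x z x
      have hgetD1 : (d.insert x x).getD x x = x :=
        hmgetD_of_some (d.insert x x) (by rw [hget1, if_pos rfl]) x
      have hbody : pfind (f+1) d x = (x, d.insert x x) := by
        show (let d1 := if d.contains x then d else d.insert x x
              let px := d1.getD x x
              if px ≠ x then
                let r := pfind f d1 px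
                (r.1, r.2.insert x r.1)
              else (px, d1)) = _
        rw [hcont]
        simp only [Bool.false_eq_true, if_false, hgetD1]
        simp
      rw [hbody]
      refine ⟨hrxx.symm, fun y => hmmem_insert d x y x |>.trans (by tauto), ?_⟩
      constructor
      · intro z w hz
        rw [hget1] at hz
        by_cases hzx : z = x
        · rw [if_pos hzx] at hz
          rw [← Option.some.inj hz]
          exact (hmmem_insert d x x x).2 (Or.inl rfl)
        · rw [if_neg hzx] at hz
          exact (hmmem_insert d x w x).2 (Or.inr (hInv.closed z w hz))
      · intro z hz
        rw [hget1] at hz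
        by_cases hzx : z = x
        · rw [if_pos hzx] at hz; simp at hz
        · rw [if_neg hzx] at hz
          exact hInv.offkey z hz
      · intro z hz
        rw [hget1] at hz
        by_cases hzx : z = x
        · rw [hzx, hrxx]
        · rw [if_neg hzx] at hz
          exact hInv.selfroot z hz
      · intro z w hz
        rw [hget1] at hz
        by_cases hzx : z = x
        · rw [if_pos hzx] at hz
          rw [← Option.some.inj hz, hzx]
        · rw [if_neg hzx] at hz
          exact hInv.edge z w hz
      · intro z w hz
        rw [hget1] at hz
        rw [hget1]
        by_cases hzx : z = x
        · rw [hzx, hrxx, if_pos rfl]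
        · rw [if_neg hzx] at hz
          have hr := hInv.rootfix z w hz
          have hrz : ρ z ≠ x := by
            intro he
            exact hx (he ▸ mem_of_getElem? d hr)
          rw [if_neg hrz]
          exact hr
      · intro y
        obtain ⟨m, hm⟩ := hInv.term y
        refine ⟨m, isFix_of_agree d (d.insert x x) ?_ ?_ m y hm⟩
        · intro z hnf
          have hzk : z ∈ d := by
            unfold FixP stepP at hnf
            cases hg : d[z]? with
            | none => exact absurd (by rw [hg]; rfl) hnf
            | some w => exact mem_of_getElem? d hg
          have hzx : z ≠ x := fun he => hx (he ▸ hzk)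
          rw [hget1, if_neg hzx]
        · intro z hf
          by_cases hzx : z = x
          · unfold FixP stepP
            rw [hget1, if_pos hzx, hzx]
            rfl
          · unfold FixP stepP
            rw [hget1, if_neg hzx]
            exact hf

-- ---- union ----
lemma invS_congr (d : Std.HashMap (Int × Int) (Int × Int)) (ρ ρ' : (Int × Int) → (Int × Int))
    (h : ∀ y, ρ y = ρ' y) (hInv : InvS d ρ) : InvS d ρ' := by
  constructor
  · exact hInv.closed
  · intro x hx
    rw [← h x]
    exact hInv.offkey x hx
  · intro x hx
    rw [← h x]
    exact hInv.selfroot x hx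
  · intro x p hp
    rw [← h x, ← h p]
    exact hInv.edge x p hp
  · intro x p hp
    rw [← h x]
    exact hInv.rootfix x p hp
  · exact hInv.term

lemma punion_spec (ρ : (Int × Int) → (Int × Int)) (d : Std.HashMap (Int × Int) (Int × Int))
    (a b : Int × Int) (hInv : InvS d ρ) :
    (∀ y, y ∈ punion d a b ↔ y ∈ d ∨ y = a ∨ y = b) ∧
    InvS (punion d a b) (fun y => if ρ y = ρ b then ρ a else ρ y) := by
  obtain ⟨ha1, ha2, ha3⟩ := pfind_spec ρ (d.size + 1) d a hInv (by omega)
  set fa := pfind (d.size + 1) d a with hfa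
  obtain ⟨hb1, hb2, hb3⟩ := pfind_spec ρ (fa.2.size + 1) fa.2 b ha3 (by omega)
  set fb := pfind (fa.2.size + 1) fa.2 b with hfb
  have hmemb : ∀ y, y ∈ fb.2 ↔ y ∈ d ∨ y = a ∨ y = b := by
    intro y
    rw [hb2 y, ha2 y]
    exact or_assoc
  have hamem : a ∈ fb.2 := (hmemb a).2 (Or.inr (Or.inl rfl))
  have hbmem : b ∈ fb.2 := (hmemb b).2 (Or.inr (Or.inr rfl))
  obtain ⟨qa, hqa⟩ : ∃ q, fb.2[a]? = some q := getElem?_some_of_mem fb.2 hamem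
  obtain ⟨qb, hqb⟩ : ∃ q, fb.2[b]? = some q := getElem?_some_of_mem fb.2 hbmem
  have hra_root : fb.2[ρ a]? = some (ρ a) := hb3.rootfix a qa hqa
  have hrb_root : fb.2[ρ b]? = some (ρ b) := hb3.rootfix b qb hqb
  have hpu : punion d a b = if fa.1 ≠ fb.1 then fb.2.insert fb.1 fa.1 else fb.2 := by
    rw [punion, ← hfa, ← hfb]
  by_cases hr : ρ a = ρ b
  · have hpu2 : punion d a b = fb.2 := by
      rw [hpu, ha1, hb1, hr]
      simp
    rw [hpu2]
    refine ⟨hmemb, invS_congr fb.2 ρ _ ?_ hb3⟩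
    intro y
    by_cases hy : ρ y = ρ b
    · simp [hy, ← hr]
    · simp [hy]
  · have hpu2 : punion d a b = fb.2.insert (ρ b) (ρ a) := by
      rw [hpu, ha1, hb1]
      simp [hr]
    rw [hpu2]
    have hrbmem : ρ b ∈ fb.2 := mem_of_getElem? fb.2 hrb_root
    have hmem' : ∀ y, y ∈ fb.2.insert (ρ b) (ρ a) ↔ y ∈ fb.2 := by
      intro y
      rw [hmmem_insert]
      constructor
      · rintro (he | hm)
        · rw [he]; exact hrbmem
        · exact hm
      · exact Or.inr
    have hget' : ∀ z, (fb.2.insert (ρ b) (ρ a))[z]? =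
        if z = ρ b then some (ρ a) else fb.2[z]? :=
      fun z => hmget_insert fb.2 (ρ b) z (ρ a)
    have hrra : ρ (ρ a) = ρ a := hb3.selfroot (ρ a) hra_root
    have hrrb : ρ (ρ b) = ρ b := hb3.selfroot (ρ b) hrb_root
    refine ⟨fun y => (hmem' y).trans (hmemb y), ?_⟩
    constructor
    · intro z w hz
      rw [hget'] at hz
      rw [hmem']
      by_cases hzb : z = ρ b
      · rw [if_pos hzb] at hz
        rw [← Option.some.inj hz]
        exact mem_of_getElem? fb.2 hra_root
      · rw [if_neg hzb] at hz
        exact hb3.closed z w hz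
    · intro z hz
      rw [hget'] at hz
      by_cases hzb : z = ρ b
      · rw [if_pos hzb] at hz; simp at hz
      · rw [if_neg hzb] at hz
        have hzz : ρ z = z := hb3.offkey z hz
        show (if ρ z = ρ b then ρ a else ρ z) = z
        rw [if_neg (by rw [hzz]; exact hzb), hzz]
    · intro z hz
      rw [hget'] at hz
      by_cases hzb : z = ρ b
      · rw [if_pos hzb] at hz
        have h' : ρ a = z := Option.some.inj hz
        rw [hzb] at h'
        exact absurd h' hr
      · rw [if_neg hzb] at hz
        have hzz : ρ z = z := hb3.selfroot z hz
        show (if ρ z = ρ b then ρ a else ρ z) = z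
        rw [if_neg (by rw [hzz]; exact hzb), hzz]
    · intro z w hz
      rw [hget'] at hz
      by_cases hzb : z = ρ b
      · rw [if_pos hzb] at hz
        show (if ρ w = ρ b then ρ a else ρ w) = (if ρ z = ρ b then ρ a else ρ z)
        rw [← Option.some.inj hz, hzb]
        rw [if_neg (by rw [hrra]; exact hr), if_pos hrrb, hrra]
      · rw [if_neg hzb] at hz
        have he : ρ w = ρ z := hb3.edge z w hz
        show (if ρ w = ρ b then ρ a else ρ w) = (if ρ z = ρ b then ρ a else ρ z)
        rw [he]
    · intro z w hz
      rw [hget'] at hz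
      have hgoala : (fb.2.insert (ρ b) (ρ a))[ρ a]? = some (ρ a) := by
        rw [hget', if_neg (fun he => hr he)]
        exact hra_root
      by_cases hzb : z = ρ b
      · show (fb.2.insert (ρ b) (ρ a))[if ρ z = ρ b then ρ a else ρ z]? =
          some (if ρ z = ρ b then ρ a else ρ z)
        rw [hzb, if_pos hrrb]
        exact hgoala
      · rw [if_neg hzb] at hz
        have hr2 := hb3.rootfix z w hz
        show (fb.2.insert (ρ b) (ρ a))[if ρ z = ρ b then ρ a else ρ z]? =
          some (if ρ z = ρ b then ρ a else ρ z)
        by_cases hzrb : ρ z = ρ b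
        · rw [if_pos hzrb]
          exact hgoala
        · rw [if_neg hzrb, hget', if_neg hzrb]
          exact hr2
    · intro y
      obtain ⟨m, hm⟩ := hb3.term y
      have hfixa : FixP fb.2 (ρ a) := by
        unfold FixP stepP
        rw [hra_root]
        rfl
      exact ⟨m + 1, term_insert fb.2 (ρ b) (ρ a) (fun he => hr he) hfixa m y hm⟩

-- ---- B's step ----
lemma bfold_eq (a b : Int × Int) :
    ∀ (comps : List (List (Int × Int))) (acc : List (Int × Int) × List (List (Int × Int))),
    comps.foldl (fun mr c => if a ∈ c ∨ b ∈ c then (mr.1 ++ c, mr.2) else (mr.1, mr.2 ++ [c])) acc =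
    (acc.1 ++ (comps.filter (fun c => decide (a ∈ c ∨ b ∈ c))).flatten,
     acc.2 ++ comps.filter (fun c => !decide (a ∈ c ∨ b ∈ c))) := by
  intro comps
  induction comps with
  | nil => intro acc; simp
  | cons c cs ih =>
    intro acc
    by_cases h : a ∈ c ∨ b ∈ c <;>
      simp [List.foldl_cons, List.filter_cons, h, ih, List.append_assoc] <;> tauto

lemma rel_step (ρ : (Int × Int) → (Int × Int)) (ks ks2 : List (Int × Int))
    (comps : List (List (Int × Int))) (a b : Int × Int)
    (hks2_iff : ∀ y, y ∈ ks2 ↔ y ∈ ks ∨ y = a ∨ y = b) (hRel : RelS ρ ks comps) :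
    RelS (fun y => if ρ y = ρ b then ρ a else ρ y) ks2 (bStep comps a b) := by
  obtain ⟨hoff, hmem, hnd, hsub, hsame, hcl, hcov, hdj⟩ := hRel
  set ρ' := fun y => if ρ y = ρ b then ρ a else ρ y with hρ'def
  have hmemks2 : ∀ y, y ∈ ks → y ∈ ks2 := fun y hy => (hks2_iff y).2 (Or.inl hy)
  have hAin : a ∈ ks2 := (hks2_iff a).2 (Or.inr (Or.inl rfl))
  have hBin : b ∈ ks2 := (hks2_iff b).2 (Or.inr (Or.inr rfl))
  -- unfold bStep
  set hit := comps.filter (fun c => decide (a ∈ c ∨ b ∈ c)) with hhitdef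
  set rest := comps.filter (fun c => !decide (a ∈ c ∨ b ∈ c)) with hrestdef
  set mg := hit.flatten with hmgdef
  set m1 := if a ∈ mg then mg else mg ++ [a] with hm1def
  set m2 := if b ∈ m1 then m1 else m1 ++ [b] with hm2def
  have hbs : bStep comps a b = rest ++ [m2] := by
    show (let p := comps.foldl (fun mr c =>
            if a ∈ c ∨ b ∈ c then (mr.1 ++ c, mr.2) else (mr.1, mr.2 ++ [c])) ([], [])
          let n1 := if a ∈ p.1 then p.1 else p.1 ++ [a]
          let n2 := if b ∈ n1 then n1 else n1 ++ [b]
          p.2 ++ [n2]) = rest ++ [m2]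
    rw [bfold_eq a b comps ([], [])]
    simp only [List.nil_append]
    rw [hm2def, hm1def, hmgdef, hhitdef, hrestdef]
  rw [hbs]
  have hmg_iff : ∀ y, y ∈ mg ↔ ∃ c, c ∈ comps ∧ (a ∈ c ∨ b ∈ c) ∧ y ∈ c := by
    intro y
    rw [hmgdef, List.mem_flatten]
    constructor
    · rintro ⟨c, hc, hyc⟩
      rw [hhitdef, List.mem_filter] at hc
      exact ⟨c, hc.1, by simpa using hc.2, hyc⟩
    · rintro ⟨c, hc, hab, hyc⟩
      exact ⟨c, by rw [hhitdef, List.mem_filter]; exact ⟨hc, by simpa using hab⟩, hyc⟩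
  have hm1_iff : ∀ y, y ∈ m1 ↔ y ∈ mg ∨ y = a := by
    intro y
    by_cases h1 : a ∈ mg
    · rw [hm1def, if_pos h1]
      constructor
      · exact Or.inl
      · rintro (h | h)
        · exact h
        · rw [h]; exact h1
    · rw [hm1def, if_neg h1]
      simp
  have hm2_iff : ∀ y, y ∈ m2 ↔ y ∈ mg ∨ y = a ∨ y = b := by
    intro y
    by_cases h2 : b ∈ m1
    · rw [hm2def, if_pos h2, hm1_iff]
      constructor
      · rintro (h | h)
        · exact Or.inl h
        · exact Or.inr (Or.inl h)
      · rintro (h | h | h)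
        · exact Or.inl h
        · exact Or.inr h
        · rw [h]
          exact (hm1_iff b).1 h2
    · rw [hm2def, if_neg h2]
      simp only [List.mem_append, List.mem_singleton, hm1_iff]
      tauto
  have hrest_iff : ∀ c, c ∈ rest ↔ c ∈ comps ∧ a ∉ c ∧ b ∉ c := by
    intro c
    rw [hrestdef, List.mem_filter]
    simp only [Bool.not_eq_true', decide_eq_false_iff_not]
    tauto
  have huniq : ∀ c c' x, c ∈ comps → c' ∈ comps → x ∈ c → x ∈ c' → c = c' := by
    intro c c' x hc hc' hx hx'
    by_cases he : c = c'
    · exact he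
    · have hsym : Symmetric (fun (c c' : List (Int × Int)) => ∀ x, x ∈ c → x ∉ c') :=
        fun u v h z hzv hzu => h z hzu hzv
      exact absurd hx' (List.Pairwise.forall hsym hdj hc hc' he x hx)
  have hρ'a : ρ' a = ρ a := by rw [hρ'def]; simp
  have hρ'b : ρ' b = ρ a := by rw [hρ'def]; simp
  -- class-of-b / class-of-a membership characterizations
  have classb : ∀ x, x ∈ ks → ρ x = ρ b → x = b ∨ ∃ c, c ∈ comps ∧ x ∈ c ∧ b ∈ c := by
    intro x hx hxb
    by_cases hbks : b ∈ ks
    · by_cases hxbe : x = b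
      · exact Or.inl hxbe
      · obtain ⟨c, hc, hxc⟩ := hcov x b hx hbks hxb hxbe
        exact Or.inr ⟨c, hc, hxc, hcl c hc x hxc b hbks hxb.symm⟩
    · exfalso
      have h1 : ρ b = b := hoff b hbks
      have h2 : ρ x ∈ ks := hmem x hx
      rw [hxb, h1] at h2
      exact hbks h2
  have classa : ∀ x, x ∈ ks → ρ x = ρ a → x = a ∨ ∃ c, c ∈ comps ∧ x ∈ c ∧ a ∈ c := by
    intro x hx hxa
    by_cases haks : a ∈ ks
    · by_cases hxae : x = a
      · exact Or.inl hxae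
      · obtain ⟨c, hc, hxc⟩ := hcov x a hx haks hxa hxae
        exact Or.inr ⟨c, hc, hxc, hcl c hc x hxc a haks hxa.symm⟩
    · exfalso
      have h1 : ρ a = a := hoff a haks
      have h2 : ρ x ∈ ks := hmem x hx
      rw [hxa, h1] at h2
      exact haks h2
  have hxnotb : ∀ c, c ∈ comps → b ∉ c → ∀ x ∈ c, ρ x ≠ ρ b := by
    intro c hc hbc x hxc he
    have hxks : x ∈ ks := hsub c hc x hxc
    rcases classb x hxks he with hxb | ⟨c', hc', hxc', hbc'⟩
    · rw [hxb] at hxc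
      exact hbc hxc
    · rw [huniq c c' x hc hc' hxc hxc'] at hbc
      exact hbc hbc'
  have hxnota : ∀ c, c ∈ comps → a ∉ c → ∀ x ∈ c, ρ x ≠ ρ a := by
    intro c hc hac x hxc he
    have hxks : x ∈ ks := hsub c hc x hxc
    rcases classa x hxks he with hxa | ⟨c', hc', hxc', hac'⟩
    · rw [hxa] at hxc
      exact hac hxc
    · rw [huniq c c' x hc hc' hxc hxc'] at hac
      exact hac hac'
  have hρ'rest : ∀ c, c ∈ rest → ∀ x ∈ c, ρ' x = ρ x := by
    intro c hc x hxc
    obtain ⟨hc', hna, hnb⟩ := (hrest_iff c).1 hc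
    show (if ρ x = ρ b then ρ a else ρ x) = ρ x
    exact if_neg (hxnotb c hc' hnb x hxc)
  have hm2root : ∀ y, y ∈ m2 → ρ' y = ρ a := by
    intro y hy
    rcases (hm2_iff y).1 hy with hymg | hya | hyb
    · obtain ⟨c, hc, hab, hyc⟩ := (hmg_iff y).1 hymg
      rcases hab with hac | hbc
      · have h1 : ρ y = ρ a := hsame c hc y hyc a hac
        show (if ρ y = ρ b then ρ a else ρ y) = ρ a
        by_cases h : ρ y = ρ b
        · rw [if_pos h]
        · rw [if_neg h]; exact h1
      · have h1 : ρ y = ρ b := hsame c hc y hyc b hbc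
        show (if ρ y = ρ b then ρ a else ρ y) = ρ a
        rw [if_pos h1]
    · rw [hya]; exact hρ'a
    · rw [hyb]; exact hρ'b
  have hMrev : ∀ y, y ∈ ks2 → ρ' y = ρ a → y ∈ m2 := by
    intro y hy hra
    rcases (hks2_iff y).1 hy with hyks | hya | hyb
    · by_cases hyb' : ρ y = ρ b
      · rcases classb y hyks hyb' with hye | ⟨c, hc, hyc, hbc⟩
        · exact (hm2_iff y).2 (Or.inr (Or.inr hye))
        · exact (hm2_iff y).2 (Or.inl ((hmg_iff y).2 ⟨c, hc, Or.inr hbc, hyc⟩))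
      · have hya' : ρ y = ρ a := by
          rw [hρ'def] at hra
          simpa [if_neg hyb'] using hra
        rcases classa y hyks hya' with hye | ⟨c, hc, hyc, hac⟩
        · exact (hm2_iff y).2 (Or.inr (Or.inl hye))
        · exact (hm2_iff y).2 (Or.inl ((hmg_iff y).2 ⟨c, hc, Or.inl hac, hyc⟩))
    · exact (hm2_iff y).2 (Or.inr (Or.inl hya))
    · exact (hm2_iff y).2 (Or.inr (Or.inr hyb))
  have hnotin_m2 : ∀ c, c ∈ rest → ∀ x, x ∈ c → x ∉ m2 := by
    intro c hc x hxc hxm2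
    obtain ⟨hc', hna, hnb⟩ := (hrest_iff c).1 hc
    rcases (hm2_iff x).1 hxm2 with hxmg | hxa | hxb
    · obtain ⟨c'', hc'', hab, hxc''⟩ := (hmg_iff x).1 hxmg
      have he := huniq c c'' x hc' hc'' hxc hxc''
      rw [← he] at hab
      rcases hab with h | h
      · exact hna h
      · exact hnb h
    · rw [hxa] at hxc
      exact hna hxc
    · rw [hxb] at hxc
      exact hnb hxc
  constructor
  -- offks
  · intro y hy
    have hyks : y ∉ ks := fun h => hy (hmemks2 y h)
    have hyy : ρ y = y := hoff y hyks
    show (if ρ y = ρ b then ρ a else ρ y) = y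
    have hneq : ρ y ≠ ρ b := by
      intro he
      by_cases hbks : b ∈ ks
      · have h2 : ρ b ∈ ks := hmem b hbks
        rw [← he, hyy] at h2
        exact hyks h2
      · have h1 : ρ b = b := hoff b hbks
        rw [h1, hyy] at he
        rw [he] at hy
        exact hy hBin
    rw [if_neg hneq]
    exact hyy
  -- memks
  · intro x hx
    have hra : ρ a ∈ ks2 := by
      by_cases haks : a ∈ ks
      · exact hmemks2 _ (hmem a haks)
      · rw [hoff a haks]; exact hAin
    show (if ρ x = ρ b then ρ a else ρ x) ∈ ks2
    by_cases h : ρ x = ρ b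
    · rw [if_pos h]; exact hra
    · rw [if_neg h]
      rcases (hks2_iff x).1 hx with hxks | hxa | hxb
      · exact hmemks2 _ (hmem x hxks)
      · rw [hxa]
        by_cases haks : a ∈ ks
        · exact hmemks2 _ (hmem a haks)
        · rw [hoff a haks]; exact hAin
      · exact absurd (by rw [hxb]) h
  -- bnodup
  · have hhitnd : mg.Nodup := by
      rw [hmgdef, List.nodup_flatten]
      constructor
      · intro l hl
        rw [hhitdef, List.mem_filter] at hl
        exact hnd l hl.1
      · refine List.Pairwise.sublist List.filter_sublist (hdj.imp ?_)
        intro c c' h z hz hz'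
        exact h z hz hz'
    have hm1nd : m1.Nodup := by
      rw [hm1def]
      by_cases h1 : a ∈ mg
      · rw [if_pos h1]; exact hhitnd
      · rw [if_neg h1, List.nodup_append]
        refine ⟨hhitnd, List.nodup_singleton a, ?_⟩
        intro z hz w hw
        rw [List.mem_singleton.1 hw]
        intro he
        rw [he] at hz
        exact h1 hz
    have hm2nd : m2.Nodup := by
      rw [hm2def]
      by_cases h2 : b ∈ m1
      · rw [if_pos h2]; exact hm1nd
      · rw [if_neg h2, List.nodup_append]
        refine ⟨hm1nd, List.nodup_singleton b, ?_⟩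
        intro z hz w hw
        rw [List.mem_singleton.1 hw]
        intro he
        rw [he] at hz
        exact h2 hz
    intro c hc
    rcases List.mem_append.1 hc with h | h
    · exact hnd c ((hrest_iff c).1 h).1
    · rw [List.mem_singleton.1 h]
      exact hm2nd
  -- bsub
  · intro c hc x hxc
    rcases List.mem_append.1 hc with h | h
    · exact hmemks2 x (hsub c ((hrest_iff c).1 h).1 x hxc)
    · rw [List.mem_singleton.1 h] at hxc
      rcases (hm2_iff x).1 hxc with hxmg | hxa | hxb
      · obtain ⟨c', hc', _, hxc'⟩ := (hmg_iff x).1 hxmg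
        exact hmemks2 x (hsub c' hc' x hxc')
      · rw [hxa]; exact hAin
      · rw [hxb]; exact hBin
  -- bsame
  · intro c hc x hxc y hyc
    rcases List.mem_append.1 hc with h | h
    · have hc' := ((hrest_iff c).1 h).1
      rw [hρ'rest c h x hxc, hρ'rest c h y hyc]
      exact hsame c hc' x hxc y hyc
    · rw [List.mem_singleton.1 h] at hxc hyc
      rw [hm2root x hxc, hm2root y hyc]
  -- bclosed
  · intro c hc x hxc y hy hyx
    rcases List.mem_append.1 hc with h | h
    · obtain ⟨hc', hna, hnb⟩ := (hrest_iff c).1 h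
      have hxks : x ∈ ks := hsub c hc' x hxc
      have hx' : ρ' x = ρ x := hρ'rest c h x hxc
      rw [hx'] at hyx
      have hnotxa : ρ x ≠ ρ a := hxnota c hc' hna x hxc
      by_cases hyb' : ρ y = ρ b
      · exfalso
        have : ρ' y = ρ a := by rw [hρ'def]; simp [hyb']
        rw [this] at hyx
        exact hnotxa hyx.symm
      · have hy' : ρ y = ρ x := by
          rw [hρ'def] at hyx
          simpa [if_neg hyb'] using hyx
        rcases (hks2_iff y).1 hy with hyks | hya | hyb
        · exact hcl c hc' x hxc y hyks hy'
        · exfalso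
          have : ρ y = ρ a := by rw [hya]
          rw [this] at hy'
          exact hnotxa hy'.symm
        · exfalso
          exact hyb' (by rw [hyb])
    · rw [List.mem_singleton.1 h] at hxc ⊢
      have : ρ' y = ρ a := by rw [hyx, hm2root x hxc]
      exact hMrev y hy this
  -- bcover
  · intro x y hx hy hxy hne
    by_cases hxa : ρ' x = ρ a
    · exact ⟨m2, List.mem_append.2 (Or.inr (List.mem_singleton.2 rfl)), hMrev x hx hxa⟩
    · have hxb' : ρ x ≠ ρ b := by
        intro he
        exact hxa (by rw [hρ'def]; simp [he])
      have hx' : ρ' x = ρ x := by rw [hρ'def]; simp [if_neg hxb']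
      have hya' : ρ' y ≠ ρ a := by rw [← hxy]; exact hxa
      have hyb' : ρ y ≠ ρ b := by
        intro he
        exact hya' (by rw [hρ'def]; simp [he])
      have hy' : ρ' y = ρ y := by rw [hρ'def]; simp [if_neg hyb']
      have hxyρ : ρ x = ρ y := by rw [← hx', ← hy', hxy]
      have hxks : x ∈ ks := by
        rcases (hks2_iff x).1 hx with h | h | h
        · exact h
        · exfalso; exact hxa (by rw [h]; exact hρ'a)
        · exfalso; exact hxa (by rw [h]; exact hρ'b)
      have hyks : y ∈ ks := by
        rcases (hks2_iff y).1 hy with h | h | h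
        · exact h
        · exfalso; exact hya' (by rw [h]; exact hρ'a)
        · exfalso; exact hya' (by rw [h]; exact hρ'b)
      obtain ⟨c, hc, hxc⟩ := hcov x y hxks hyks hxyρ hne
      have hna : a ∉ c := by
        intro hac
        exact hxa (by rw [hx']; exact hsame c hc x hxc a hac)
      have hnb : b ∉ c := by
        intro hbc
        exact hxb' (hsame c hc x hxc b hbc)
      exact ⟨c, List.mem_append.2 (Or.inl ((hrest_iff c).2 ⟨hc, hna, hnb⟩)), hxc⟩
  -- bdisj
  · rw [List.pairwise_append]
    refine ⟨List.Pairwise.sublist List.filter_sublist hdj, List.pairwise_singleton _ _, ?_⟩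
    intro c hc c' hc' x hxc
    rw [List.mem_singleton.1 hc']
    exact hnotin_m2 c hc x hxc

-- ---- counting ----
lemma rel_counting (ρ : (Int × Int) → (Int × Int)) :
    ∀ (comps : List (List (Int × Int))) (ks : List (Int × Int)),
    ks.Nodup →
    (∀ c ∈ comps, c.Nodup) →
    (∀ c ∈ comps, ∀ x ∈ c, x ∈ ks) →
    (∀ c ∈ comps, ∀ x ∈ c, ∀ y ∈ c, ρ x = ρ y) →
    (∀ c ∈ comps, ∀ x ∈ c, ∀ y, y ∈ ks → ρ y = ρ x → y ∈ c) →
    (∀ x y, x ∈ ks → y ∈ ks → ρ x = ρ y → x ≠ y → ∃ c ∈ comps, x ∈ c) →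
    comps.Pairwise (fun c c' => ∀ x, x ∈ c → x ∉ c') →
    (((PySem.List.dedup (ks.map ρ)).map (fun r => ((ks.map ρ).count r : Int))).filter
        (fun s => decide (1 < s))).Perm
      ((comps.filter (fun c => decide (1 < c.length))).map (fun c => (c.length : Int))) := by
  intro comps
  induction comps with
  | nil =>
    intro ks hknd _ _ _ _ hcov _
    have huniqcl : ∀ x y, x ∈ ks → y ∈ ks → ρ x = ρ y → x = y := by
      intro x y hx hy hr
      by_contra hne
      obtain ⟨c, hc, _⟩ := hcov x y hx hy hr hne
      simp at hc
    have hfil : ((PySem.List.dedup (ks.map ρ)).map (fun r => ((ks.map ρ).count r : Int))).filter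
        (fun s => decide (1 < s)) = [] := by
      rw [List.filter_eq_nil_iff]
      intro s hs
      rw [List.mem_map] at hs
      obtain ⟨r, hr, hfr⟩ := hs
      have hrmem : r ∈ ks.map ρ := (PySem.List.mem_dedup (ks.map ρ) r).1 hr
      have hcnt : (ks.map ρ).count r ≤ 1 := by
        have h1 : (ks.map ρ).count r = ks.countP (fun y => ρ y == r) := by
          rw [List.count, List.countP_map]
          rfl
        rw [h1, List.countP_eq_length_filter]
        have hfnd := hknd.filter (fun y => ρ y == r)
        cases hf : ks.filter (fun y => ρ y == r) with
        | nil => simp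
        | cons x t =>
          cases t with
          | nil => simp
          | cons y t2 =>
            exfalso
            rw [hf] at hfnd
            have hxy : x ≠ y := by
              rw [List.nodup_cons] at hfnd
              exact fun he => hfnd.1 (he ▸ List.mem_cons_self ..)
            have hx : x ∈ ks ∧ ρ x = r := by
              have := List.mem_filter.1 (hf ▸ (List.mem_cons_self ..))
              exact ⟨this.1, by simpa using this.2⟩
            have hy : y ∈ ks ∧ ρ y = r := by
              have := List.mem_filter.1 (hf ▸ (List.mem_cons_of_mem x (List.mem_cons_self ..)))
              exact ⟨this.1, by simpa using this.2⟩
            exact hxy (huniqcl x y hx.1 hy.1 (by rw [hx.2, hy.2]))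
      rw [← hfr]
      simp only [decide_eq_true_eq, not_lt]
      exact_mod_cast hcnt
    rw [hfil]
    simp
  | cons c rest ih =>
    intro ks hknd hnd hsub hsame hcl hcov hdj
    have hc0 : c ∈ c :: rest := List.mem_cons_self ..
    have hdj' := (List.pairwise_cons.1 hdj)
    by_cases hcnil : c = []
    · have hstep : (List.filter (fun c => decide (1 < c.length)) (c :: rest)) =
          List.filter (fun c => decide (1 < c.length)) rest := by
        rw [List.filter_cons, hcnil]
        simp
      rw [hstep]
      refine ih ks hknd (fun c' hc' => hnd c' (List.mem_cons_of_mem _ hc'))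
        (fun c' hc' => hsub c' (List.mem_cons_of_mem _ hc'))
        (fun c' hc' => hsame c' (List.mem_cons_of_mem _ hc'))
        (fun c' hc' => hcl c' (List.mem_cons_of_mem _ hc')) ?_ hdj'.2
      intro x y hx hy hr hne
      obtain ⟨c', hc', hxc'⟩ := hcov x y hx hy hr hne
      rcases List.mem_cons.1 hc' with he | hm
      · rw [he, hcnil] at hxc'
        simp at hxc'
      · exact ⟨c', hm, hxc'⟩
    · obtain ⟨x0, hx0⟩ := List.exists_mem_of_ne_nil c hcnil
      set r0 := ρ x0 with hr0def
      set ks' := ks.filter (fun y => !decide (y ∈ c)) with hks'def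
      set kc := ks.filter (fun y => decide (y ∈ c)) with hkcdef
      have hcsub : ∀ z ∈ c, z ∈ ks := hsub c hc0
      have hcall : ∀ z ∈ c, ρ z = r0 := fun z hz => hsame c hc0 z hz x0 hx0
      have hks'mem : ∀ z, z ∈ ks' ↔ z ∈ ks ∧ z ∉ c := by
        intro z
        rw [hks'def, List.mem_filter]
        simp
      have hkcmem : ∀ z, z ∈ kc ↔ z ∈ c := by
        intro z
        rw [hkcdef, List.mem_filter]
        simp only [decide_eq_true_eq]
        exact ⟨fun h => h.2, fun h => ⟨hcsub z h, h⟩⟩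
      have hkc_perm : kc.Perm c := by
        refine List.perm_of_nodup_nodup_toFinset_eq (hknd.filter _) (hnd c hc0) ?_
        ext z
        rw [List.mem_toFinset, List.mem_toFinset, hkcmem]
      have hsplit : (kc ++ ks').Perm ks := List.filter_append_perm _ ks
      have hmap_perm : (ks.map ρ).Perm (kc.map ρ ++ ks'.map ρ) := by
        have := (hsplit.symm).map ρ
        rwa [List.map_append] at this
      have hcount_ks : ∀ r, (ks.map ρ).count r = (kc.map ρ).count r + (ks'.map ρ).count r := by
        intro r
        rw [hmap_perm.count_eq, List.count_append]
      have hcount0 : ∀ r, r ≠ r0 → (kc.map ρ).count r = 0 := by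
        intro r hr
        rw [List.count_eq_zero]
        intro hmem2
        rw [List.mem_map] at hmem2
        obtain ⟨z, hz, hze⟩ := hmem2
        rw [hkcmem] at hz
        exact hr (by rw [← hze, hcall z hz])
      have hcountc : (kc.map ρ).count r0 = c.length := by
        rw [(hkc_perm.map ρ).count_eq]
        have : List.count r0 (c.map ρ) = (c.map ρ).length :=
          List.count_eq_length.2 (by
            intro w hw
            rw [List.mem_map] at hw
            obtain ⟨z, hz, hze⟩ := hw
            rw [← hze, hcall z hz])
        rw [this, List.length_map]
      have hr0notks' : r0 ∉ ks'.map ρ := by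
        intro hmem2
        rw [List.mem_map] at hmem2
        obtain ⟨z, hz, hze⟩ := hmem2
        rw [hks'mem] at hz
        exact hz.2 (hcl c hc0 x0 hx0 z hz.1 hze)
      have hD_perm : (PySem.List.dedup (ks.map ρ)).Perm (r0 :: PySem.List.dedup (ks'.map ρ)) := by
        refine List.perm_of_nodup_nodup_toFinset_eq (PySem.List.nodup_dedup _) ?_ ?_
        · rw [List.nodup_cons]
          exact ⟨fun h => hr0notks' ((PySem.List.mem_dedup _ _).1 h), PySem.List.nodup_dedup _⟩
        · ext z
          simp only [List.mem_toFinset, List.mem_cons, PySem.List.mem_dedup]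
          constructor
          · intro hz
            rw [List.mem_map] at hz
            obtain ⟨y, hy, hye⟩ := hz
            by_cases hyc : y ∈ c
            · exact Or.inl (by rw [← hye, hcall y hyc])
            · exact Or.inr (by
                rw [List.mem_map]
                exact ⟨y, (hks'mem y).2 ⟨hy, hyc⟩, hye⟩)
          · intro hz
            rcases hz with he | hm
            · rw [he, hr0def]
              exact List.mem_map_of_mem (hcsub x0 hx0)
            · rw [List.mem_map] at hm ⊢
              obtain ⟨y, hy, hye⟩ := hm
              exact ⟨y, ((hks'mem y).1 hy).1, hye⟩
      -- IH for rest over ks'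
      have hknd' : ks'.Nodup := hknd.filter _
      have ihp := ih ks' hknd'
        (fun c' hc' => hnd c' (List.mem_cons_of_mem _ hc'))
        (by
          intro c' hc' x hxc'
          rw [hks'mem]
          exact ⟨hsub c' (List.mem_cons_of_mem _ hc') x hxc', fun hxc => hdj'.1 c' hc' x hxc hxc'⟩)
        (fun c' hc' => hsame c' (List.mem_cons_of_mem _ hc'))
        (by
          intro c' hc' x hxc' y hy hr
          exact hcl c' (List.mem_cons_of_mem _ hc') x hxc' y ((hks'mem y).1 hy).1 hr)
        (by
          intro x y hx hy hr hne
          obtain ⟨c', hc', hxc'⟩ := hcov x y ((hks'mem x).1 hx).1 ((hks'mem y).1 hy).1 hr hne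
          rcases List.mem_cons.1 hc' with he | hm
          · exact absurd hxc' (by rw [he]; exact ((hks'mem x).1 hx).2)
          · exact ⟨c', hm, hxc'⟩)
        hdj'.2
      -- assemble
      have hfr0 : ((ks.map ρ).count r0 : Int) = (c.length : Int) := by
        rw [hcount_ks r0, hcountc, List.count_eq_zero.2 hr0notks']
        simp
      have hmapD : (PySem.List.dedup (ks'.map ρ)).map (fun r => ((ks.map ρ).count r : Int)) =
          (PySem.List.dedup (ks'.map ρ)).map (fun r => ((ks'.map ρ).count r : Int)) := by
        refine List.map_congr_left ?_
        intro r hr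
        have hrne : r ≠ r0 := by
          intro he
          exact hr0notks' (he ▸ (PySem.List.mem_dedup _ _).1 hr)
        rw [hcount_ks r, hcount0 r hrne]
        simp
      have step1 := (hD_perm.map (fun r => ((ks.map ρ).count r : Int))).filter
        (fun s => decide (1 < s))
      refine step1.trans ?_
      rw [List.map_cons, hfr0, hmapD, List.filter_cons, List.filter_cons]
      have hcond : (decide (1 < (c.length : Int))) = (decide (1 < c.length)) :=
        decide_eq_decide.2 (by constructor <;> intro h <;> exact_mod_cast h)
      rw [hcond]
      by_cases h : 1 < c.length
      · rw [if_pos (by simp [h]), if_pos (by simp [h])]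
        rw [List.map_cons]
        exact ihp.cons _
      · rw [if_neg (by simp [h]), if_neg (by simp [h])]
        exact ihp

lemma sizes_loop (ρ : (Int × Int) → (Int × Int)) :
    ∀ (ks : List (Int × Int)) (d : Std.HashMap (Int × Int) (Int × Int)) (s : Std.HashMap (Int × Int) Int),
    InvS d ρ → (∀ x ∈ ks, x ∈ d) →
    (ks.foldl (fun (sd : Std.HashMap (Int × Int) Int × Std.HashMap (Int × Int) (Int × Int)) node =>
        let f := pfind (sd.2.size + 1) sd.2 node
        (sd.1.insert f.1 (sd.1.getD f.1 0 + 1), f.2)) (s, d)).1 =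
    ks.foldl (fun s x => s.insert (ρ x) (s.getD (ρ x) 0 + 1)) s := by
  intro ks
  induction ks with
  | nil => intro d s _ _; rfl
  | cons x ks ih =>
    intro d s hInv hks
    obtain ⟨h1, h2, h3⟩ := pfind_spec ρ (d.size + 1) d x hInv (by omega)
    simp only [List.foldl_cons, h1]
    refine ih (pfind (d.size + 1) d x).2 _ h3 ?_
    intro y hy
    exact (h2 y).2 (Or.inl (hks y (List.mem_cons_of_mem _ hy)))

-- ---- initial grid state ----
lemma grid_fold_prop (rows cols : Int) :
    ∀ (x p : Int × Int), ((PySem.List.pyRange 0 rows 1).foldl (fun d rr =>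
        (PySem.List.pyRange 0 cols 1).foldl (fun d cc => d.insert (rr, cc) (rr, cc)) d)
        (∅ : Std.HashMap (Int × Int) (Int × Int)))[x]? = some p → p = x := by
  have inner : ∀ (l : List Int) (rr : Int) (d : Std.HashMap (Int × Int) (Int × Int)),
      (∀ (x p : Int × Int), d[x]? = some p → p = x) →
      (∀ (x p : Int × Int), (l.foldl (fun d cc => d.insert (rr, cc) (rr, cc)) d)[x]? = some p → p = x) := by
    intro l rr
    induction l with
    | nil => exact fun d h => h
    | cons cc l ih =>
      intro d h2
      refine ih (d.insert (rr, cc) (rr, cc)) ?_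
      intro x p hp
      rw [hmget_insert] at hp
      by_cases hx : x = (rr, cc)
      · rw [if_pos hx] at hp
        rw [← Option.some.inj hp, hx]
      · rw [if_neg hx] at hp
        exact h2 x p hp
  have outer : ∀ (l : List Int) (d : Std.HashMap (Int × Int) (Int × Int)),
      (∀ (x p : Int × Int), d[x]? = some p → p = x) →
      (∀ (x p : Int × Int), (l.foldl (fun d rr => (PySem.List.pyRange 0 cols 1).foldl
          (fun d cc => d.insert (rr, cc) (rr, cc)) d) d)[x]? = some p → p = x) := by
    intro l
    induction l with
    | nil => exact fun d h => h
    | cons rr l ih =>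
      intro d h2
      exact ih _ (inner (PySem.List.pyRange 0 cols 1) rr d h2)
  exact outer (PySem.List.pyRange 0 rows 1) ∅ (by intro x p hp; simp at hp)

lemma grid_inv (rows cols : Int) :
    InvS ((PySem.List.pyRange 0 rows 1).foldl (fun d rr =>
        (PySem.List.pyRange 0 cols 1).foldl (fun d cc => d.insert (rr, cc) (rr, cc)) d)
        (∅ : Std.HashMap (Int × Int) (Int × Int))) (fun y => y) := by
  have h2 := grid_fold_prop rows cols
  constructor
  · intro x p hp
    rw [h2 x p hp]
    exact mem_of_getElem? _ hp
  · intro x _; rfl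
  · intro x _; rfl
  · intro x p hp
    rw [h2 x p hp]
  · intro x p hp
    have he := h2 x p hp
    rw [he] at hp
    exact hp
  · intro x
    refine ⟨0, ?_⟩
    show FixP _ x
    unfold FixP stepP
    cases hg : ((PySem.List.pyRange 0 rows 1).foldl (fun d rr =>
        (PySem.List.pyRange 0 cols 1).foldl (fun d cc => d.insert (rr, cc) (rr, cc)) d)
        (∅ : Std.HashMap (Int × Int) (Int × Int)))[x]? with
    | none => rfl
    | some p => rw [h2 x p hg]; rfl

lemma grid_rel (rows cols : Int) :
    RelS (fun y => y) ((PySem.List.pyRange 0 rows 1).foldl (fun d rr =>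
        (PySem.List.pyRange 0 cols 1).foldl (fun d cc => d.insert (rr, cc) (rr, cc)) d)
        (∅ : Std.HashMap (Int × Int) (Int × Int))).keys [] := by
  constructor
  · intro y _; rfl
  · intro x hx; exact hx
  · intro c hc; simp at hc
  · intro c hc; simp at hc
  · intro c hc; simp at hc
  · intro c hc; simp at hc
  · intro x y _ _ hxy hne; exact absurd hxy hne
  · exact List.Pairwise.nil

-- ---- edge loop ----
lemma loop_inv :
    ∀ (edges : List ((Int × Int) × (Int × Int))) (d : Std.HashMap (Int × Int) (Int × Int))
      (comps : List (List (Int × Int))) (ρ : (Int × Int) → (Int × Int)),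
    InvS d ρ → RelS ρ d.keys comps →
    ∃ ρ', InvS (edges.foldl (fun d e => punion d e.1 e.2) d) ρ' ∧
      RelS ρ' (edges.foldl (fun d e => punion d e.1 e.2) d).keys
        (edges.foldl (fun comps e => bStep comps e.1 e.2) comps) := by
  intro edges
  induction edges with
  | nil => exact fun d comps ρ hInv hRel => ⟨ρ, hInv, hRel⟩
  | cons e es ih =>
    intro d comps ρ hInv hRel
    obtain ⟨hk, hI⟩ := punion_spec ρ d e.1 e.2 hInv
    have hks2 : ∀ y, y ∈ (punion d e.1 e.2).keys ↔ y ∈ d.keys ∨ y = e.1 ∨ y = e.2 := by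
      intro y
      rw [Std.HashMap.mem_keys, Std.HashMap.mem_keys, hk y]
    have hR := rel_step ρ d.keys (punion d e.1 e.2).keys comps e.1 e.2 hks2 hRel
    simp only [List.foldl_cons]
    exact ih (punion d e.1 e.2) (bStep comps e.1 e.2) _ hI hR

-- ---- the sizes dict (a counting fold over a HashMap) ----
lemma hm_getD_fold (ρ : (Int × Int) → (Int × Int)) :
    ∀ (l : List (Int × Int)) (s : Std.HashMap (Int × Int) Int) (r : Int × Int),
    (l.foldl (fun s x => s.insert (ρ x) (s.getD (ρ x) 0 + 1)) s).getD r 0 =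
      s.getD r 0 + ((l.map ρ).count r : Int) := by
  intro l
  induction l with
  | nil => intro s r; simp
  | cons x l ih =>
    intro s r
    rw [List.foldl_cons, ih]
    have hgd : (s.insert (ρ x) (s.getD (ρ x) 0 + 1)).getD r 0 =
        if ρ x = r then s.getD (ρ x) 0 + 1 else s.getD r 0 := by
      rw [Std.HashMap.getD_insert]
      by_cases h : ρ x = r
      · rw [if_pos h, if_pos (beq_iff_eq.mpr h)]
      · rw [if_neg h, if_neg (fun hb => h (beq_iff_eq.mp hb))]
    rw [hgd, List.map_cons, List.count_cons]
    by_cases h : ρ x = r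
    · rw [if_pos h, h]
      simp only [beq_self_eq_true, if_true]
      push_cast
      ring
    · rw [if_neg h]
      have : (ρ x == r) = false := by
        rw [beq_eq_false_iff_ne]
        exact h
      rw [this]
      simp

lemma hm_mem_fold (ρ : (Int × Int) → (Int × Int)) :
    ∀ (l : List (Int × Int)) (s : Std.HashMap (Int × Int) Int) (r : Int × Int),
    (r ∈ l.foldl (fun s x => s.insert (ρ x) (s.getD (ρ x) 0 + 1)) s) ↔ r ∈ s ∨ r ∈ l.map ρ := by
  intro l
  induction l with
  | nil => intro s r; simp
  | cons x l ih =>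
    intro s r
    rw [List.foldl_cons, ih]
    have hmemi : r ∈ s.insert (ρ x) (s.getD (ρ x) 0 + 1) ↔ r = ρ x ∨ r ∈ s := by
      rw [Std.HashMap.mem_insert]
      constructor
      · rintro (hb | hm)
        · exact Or.inl (beq_iff_eq.mp hb).symm
        · exact Or.inr hm
      · rintro (he | hm)
        · exact Or.inl (beq_iff_eq.mpr he.symm)
        · exact Or.inr hm
    rw [hmemi, List.map_cons, List.mem_cons]
    tauto

-- sizes.values() : the value list of a HashMap is its key list mapped through lookup
lemma hm_toList_snd (m : Std.HashMap (Int × Int) Int) :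
    m.toList.map Prod.snd = m.keys.map (fun k => m.getD k 0) := by
  have h : ∀ p ∈ m.toList, p.2 = m.getD p.1 0 := by
    intro p hp
    obtain ⟨k, v⟩ := p
    have hg : m[k]? = some v := Std.HashMap.mem_toList_iff_getElem?_eq_some.1 hp
    show v = m.getD k 0
    rw [Std.HashMap.getD_eq_getD_getElem?, hg]
    rfl
  rw [← Std.HashMap.map_fst_toList_eq_keys, List.map_map]
  exact List.map_congr_left h


-- ---- final sort glue ----
lemma sorted_rev_congr_perm (l1 l2 : List Int) (h : l1.Perm l2) :
    PySem.List.sorted l1 (fun x => x) true = PySem.List.sorted l2 (fun x => x) true := by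
  have p1 := PySem.List.sorted_perm l1 (fun x => x) true
  have p2 := PySem.List.sorted_perm l2 (fun x => x) true
  have hp : (PySem.List.sorted l1 (fun x => x) true).Perm (PySem.List.sorted l2 (fun x => x) true) :=
    p1.trans (h.trans p2.symm)
  have s1 := PySem.List.sorted_pairwise_rev l1 (fun x => x)
  have s2 := PySem.List.sorted_pairwise_rev l2 (fun x => x)
  exact List.Perm.eq_of_pairwise (fun a b _ _ h1 h2 => le_antisymm h2 h1) s1 s2 hp

-- ===== VERDICT (by name: the statement is the Claim_ definition above) =====
theorem merge_cluster_sizes_py_spec : Claim_equal_merge_cluster_sizes_py := by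
  intro rows cols es _
  show merge_cluster_sizes_py rows cols es = merge_cluster_sizes_py_alt rows cols es
  by_cases hnil : es = []
  · rw [hnil]
    rfl
  · set d0 := (PySem.List.pyRange 0 rows 1).foldl (fun d rr =>
        (PySem.List.pyRange 0 cols 1).foldl (fun d cc => d.insert (rr, cc) (rr, cc)) d)
        (∅ : Std.HashMap (Int × Int) (Int × Int)) with hd0
    set d1 := es.foldl (fun d e => punion d e.1 e.2) d0 with hd1
    set comps := es.foldl (fun comps e => bStep comps e.1 e.2) ([] : List (List (Int × Int)))
      with hcomps
    have hInv0 := grid_inv rows cols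
    have hRel0 := grid_rel rows cols
    rw [← hd0] at hInv0 hRel0
    obtain ⟨ρ, hInv1, hRel1⟩ := loop_inv es d0 [] (fun y => y) hInv0 hRel0
    rw [← hd1] at hInv1
    rw [← hd1, ← hcomps] at hRel1
    have hs := sizes_loop ρ d1.keys d1 ∅ hInv1 (fun x hx => Std.HashMap.mem_keys.1 hx)
    set S := d1.keys.foldl (fun s x => s.insert (ρ x) (s.getD (ρ x) 0 + 1))
      (∅ : Std.HashMap (Int × Int) Int) with hS
    have hgetD : ∀ r, S.getD r 0 = ((d1.keys.map ρ).count r : Int) := by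
      intro r
      rw [hS, hm_getD_fold]
      simp
    have hmemS : ∀ r, r ∈ S.keys ↔ r ∈ d1.keys.map ρ := by
      intro r
      rw [Std.HashMap.mem_keys, hS, hm_mem_fold]
      simp
    have hndS : S.keys.Nodup := Std.HashMap.nodup_keys
    have hkeysperm : S.keys.Perm (PySem.List.dedup (d1.keys.map ρ)) := by
      refine List.perm_of_nodup_nodup_toFinset_eq hndS (PySem.List.nodup_dedup _) ?_
      ext z
      rw [List.mem_toFinset, List.mem_toFinset, hmemS, PySem.List.mem_dedup]
    have hmapS : S.keys.map (fun k => S.getD k 0) =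
        S.keys.map (fun r => ((d1.keys.map ρ).count r : Int)) :=
      List.map_congr_left (fun r _ => hgetD r)
    have hp1 : (S.keys.map (fun k => S.getD k 0)).Perm
        ((PySem.List.dedup (d1.keys.map ρ)).map (fun r => ((d1.keys.map ρ).count r : Int))) := by
      rw [hmapS]
      exact hkeysperm.map _
    have hperm := rel_counting ρ comps d1.keys Std.HashMap.nodup_keys hRel1.bnodup hRel1.bsub
      hRel1.bsame hRel1.bclosed hRel1.bcover hRel1.bdisj
    have hfinal := (hp1.filter (fun s => decide (1 < s))).trans hperm
    have hAeq : merge_cluster_sizes_py rows cols es = PySem.List.sorted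
        ((S.keys.map (fun k => S.getD k 0)).filter (fun s => decide (1 < s))) (fun x => x) true := by
      simp only [merge_cluster_sizes_py, if_neg hnil]
      rw [← hd0, ← hd1, hs, hm_toList_snd]
    have hBeq : merge_cluster_sizes_py_alt rows cols es = PySem.List.sorted
        ((comps.filter (fun c => decide (1 < c.length))).map (fun c => (c.length : Int)))
        (fun x => x) true := by
      simp only [merge_cluster_sizes_py_alt]
      rw [← hcomps]
    rw [hAeq, hBeq]
    exact sorted_rev_congr_perm _ _ hfinal
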